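-- pv_equiv track=rewrite | github.com/odsail/weekly-pool | cbs_sports_picks_collector.py | _is_team_name
-- ===== SOURCE A (Python) =====
-- def _is_team_name(text: str) -> bool:
--     """Check if text looks like an NFL team name"""
--     # Common NFL team name patterns
--     team_indicators = [
--         'Chiefs', 'Ravens', 'Bills', 'Dolphins', 'Patriots', 'Jets',
--         'Steelers', 'Browns', 'Bengals', 'Colts', 'Titans', 'Jaguars',
--         'Texans', 'Broncos', 'Chargers', 'Raiders', 'Cowboys', 'Eagles',
--         'Giants', 'Commanders', 'Packers', 'Vikings', 'Bears', 'Lions',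
--         'Buccaneers', 'Saints', 'Falcons', 'Panthers', '49ers', 'Rams',
--         'Seahawks', 'Cardinals'
--     ]
--
--     return any(indicator in text for indicator in team_indicators)
-- ===== SOURCE B (Python) =====
-- _TEAM_NAMES = [
--     'Chiefs', 'Ravens', 'Bills', 'Dolphins', 'Patriots', 'Jets',
--     'Steelers', 'Browns', 'Bengals', 'Colts', 'Titans', 'Jaguars',
--     'Texans', 'Broncos', 'Chargers', 'Raiders', 'Cowboys', 'Eagles',
--     'Giants', 'Commanders', 'Packers', 'Vikings', 'Bears', 'Lions',
--     'Buccaneers', 'Saints', 'Falcons', 'Panthers', '49ers', 'Rams',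
--     'Seahawks', 'Cardinals'
-- ]
--
-- # Index the team names by first character once, so the text is scanned in a
-- # single pass: at each position only the names starting with that character
-- # are tried.
-- _BY_FIRST = {}
-- for _n in _TEAM_NAMES:
--     _BY_FIRST.setdefault(_n[0], []).append(_n)
--
--
-- def _is_team_name(text: str) -> bool:
--     for i, ch in enumerate(text):
--         for name in _BY_FIRST.get(ch, ()):
--             if text.startswith(name, i):
--                 return True
--     return False
-- ===== Notes on version B (the rewrite author's own statement) =====
-- stated objective: alternative
-- what changed: Replaces 32 sequential full-text substring scans (any(ind in text)) with a single left-to-right pass over the text using a first-character index of the team names, trying only the names that can start at each position.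
import Mathlib
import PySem

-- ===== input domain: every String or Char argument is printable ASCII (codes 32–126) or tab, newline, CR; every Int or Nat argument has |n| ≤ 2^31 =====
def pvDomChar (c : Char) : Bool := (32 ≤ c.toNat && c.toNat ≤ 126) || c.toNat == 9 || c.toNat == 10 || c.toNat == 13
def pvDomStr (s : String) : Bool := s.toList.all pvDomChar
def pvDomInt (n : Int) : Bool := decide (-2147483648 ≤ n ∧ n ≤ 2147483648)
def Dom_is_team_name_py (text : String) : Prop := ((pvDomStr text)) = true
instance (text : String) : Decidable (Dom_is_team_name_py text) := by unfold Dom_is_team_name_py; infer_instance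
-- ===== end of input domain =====

-- B replaces A's 32 sequential substring scans by one pass over the text with a
-- first-character index of the team names (alternative decomposition, same results).


-- ===== PORT A =====
def teamIndicators : List String :=
  ["Chiefs", "Ravens", "Bills", "Dolphins", "Patriots", "Jets",
   "Steelers", "Browns", "Bengals", "Colts", "Titans", "Jaguars",
   "Texans", "Broncos", "Chargers", "Raiders", "Cowboys", "Eagles",
   "Giants", "Commanders", "Packers", "Vikings", "Bears", "Lions",
   "Buccaneers", "Saints", "Falcons", "Panthers", "49ers", "Rams",
   "Seahawks", "Cardinals"]

def is_team_name_py (text : String) : Bool :=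
  teamIndicators.any (fun indicator => PySem.Str.isIn indicator text)

-- ===== PORT B =====
def teamNamesB : List (List Char) :=
  (["Chiefs", "Ravens", "Bills", "Dolphins", "Patriots", "Jets",
    "Steelers", "Browns", "Bengals", "Colts", "Titans", "Jaguars",
    "Texans", "Broncos", "Chargers", "Raiders", "Cowboys", "Eagles",
    "Giants", "Commanders", "Packers", "Vikings", "Bears", "Lions",
    "Buccaneers", "Saints", "Falcons", "Panthers", "49ers", "Rams",
    "Seahawks", "Cardinals"] : List String).map String.toList

-- the module-level _BY_FIRST dict: names indexed by their first character
def byFirstStep (d : PySem.Dict Char (List (List Char))) (n : List Char) :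
    PySem.Dict Char (List (List Char)) :=
  match n with
  | [] => d
  | c :: _ => d.insert c (d.getD c [] ++ [n])

def byFirst : PySem.Dict Char (List (List Char)) :=
  teamNamesB.foldl byFirstStep PySem.Dict.empty

-- the single pass: for i, ch in enumerate(text): try the names starting with ch
def scanB : List Char → Bool
  | [] => false
  | c :: rest =>
      ((byFirst.getD c []).any (fun n => PySem.Chars.startswith (c :: rest) n)) || scanB rest

def is_team_name_py_alt (text : String) : Bool := scanB text.toList

-- ===== PRECONDITION & SPEC =====
def Spec_is_team_name_py (text : String) (out : Bool) : Prop := out = is_team_name_py_alt text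
instance (text : String) (out : Bool) : Decidable (Spec_is_team_name_py text out) := by unfold Spec_is_team_name_py; infer_instance

-- ===== CLAIM (what is proved, stated in full; the proofs are below) =====
def Claim_equal_is_team_name_py : Prop := ∀ (text : String), Dom_is_team_name_py text → Spec_is_team_name_py text (is_team_name_py text)

-- ===== LEMMAS AND PROOFS =====

-- the built dict groups exactly: the bucket of c is the names whose head is c
theorem byFirstStep_fold_getD (l : List (List Char))
    (d : PySem.Dict Char (List (List Char))) (c : Char) :
    (l.foldl byFirstStep d).getD c [] =
      d.getD c [] ++ l.filter (fun n => n.head? == some c) := by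
  induction l generalizing d with
  | nil => simp
  | cons n t ih =>
    cases n with
    | nil => simpa [byFirstStep] using ih d
    | cons c' tl =>
      simp only [List.foldl_cons, byFirstStep, ih, List.filter_cons]
      by_cases h : c' = c
      · subst h; simp
      · simp [PySem.Dict.getD_insert, Ne.symm h, h]

theorem mem_byFirst_getD (c : Char) (n : List Char) :
    n ∈ byFirst.getD c [] ↔ n ∈ teamNamesB ∧ n.head? = some c := by
  rw [byFirst, byFirstStep_fold_getD]
  simp [List.mem_filter]

theorem teamNamesB_ne_nil : ∀ n ∈ teamNamesB, n ≠ [] := by decide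

theorem scanB_iff (s : List Char) :
    scanB s = true ↔ ∃ n ∈ teamNamesB, ∃ j, n <+: s.drop j := by
  induction s with
  | nil =>
    simp only [scanB, Bool.false_eq_true, false_iff]
    rintro ⟨n, hn, j, hp⟩
    simp only [List.drop_nil] at hp
    exact teamNamesB_ne_nil n hn (List.prefix_nil.mp hp)
  | cons c rest ih =>
    simp only [scanB, Bool.or_eq_true, List.any_eq_true, ih]
    constructor
    · rintro (⟨n, hn, hsw⟩ | ⟨n, hn, j, hp⟩)
      · rcases (mem_byFirst_getD c n).mp hn with ⟨hmem, _⟩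
        exact ⟨n, hmem, 0, by simpa using (PySem.Chars.startswith_iff _ _).mp hsw⟩
      · exact ⟨n, hn, j + 1, by simpa using hp⟩
    · rintro ⟨n, hn, j, hp⟩
      cases j with
      | zero =>
        left
        have hne := teamNamesB_ne_nil n hn
        simp only [List.drop_zero] at hp
        have hhead : n.head? = some c := by
          cases n with
          | nil => exact absurd rfl hne
          | cons a b =>
            rcases hp with ⟨t, ht⟩
            simp at ht
            simp [ht.1]
        exact ⟨n, (mem_byFirst_getD c n).mpr ⟨hn, hhead⟩,
          (PySem.Chars.startswith_iff _ _).mpr hp⟩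
      | succ k =>
        right
        exact ⟨n, hn, k, by simpa using hp⟩

-- ===== VERDICT (by name: the statement is the Claim_ definition above) =====
theorem is_team_name_py_spec : Claim_equal_is_team_name_py := by
  intro text _
  unfold Spec_is_team_name_py is_team_name_py is_team_name_py_alt
  have hnames : teamNamesB = teamIndicators.map String.toList := by rfl
  rcases hA : teamIndicators.any (fun indicator => PySem.Str.isIn indicator text) with _ | _
  · rcases hB : scanB text.toList with _ | _
    · rfl
    · exfalso
      rcases (scanB_iff _).mp hB with ⟨n, hn, j, hp⟩
      rw [hnames, List.mem_map] at hn
      rcases hn with ⟨ind, hind, rfl⟩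
      have hIn : PySem.Str.isIn ind text = true := by
        rw [PySem.Str.isIn_iff_infix]
        exact ((PySem.Chars.exists_prefix_drop_iff_isIn _ _).mp ⟨j, hp⟩ |>
          (PySem.Chars.isIn_iff_infix _ _).mp)
      have hAny : teamIndicators.any (fun indicator => PySem.Str.isIn indicator text) = true :=
        List.any_eq_true.mpr ⟨ind, hind, hIn⟩
      rw [hA] at hAny; exact Bool.false_ne_true hAny
  · rcases List.any_eq_true.mp hA with ⟨ind, hind, hIn⟩
    have hinf := (PySem.Str.isIn_iff_infix _ _).mp hIn
    have : PySem.Chars.isIn ind.toList text.toList = true :=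
      (PySem.Chars.isIn_iff_infix _ _).mpr hinf
    rcases (PySem.Chars.exists_prefix_drop_iff_isIn _ _).mpr this with ⟨j, hp⟩
    exact ((scanB_iff _).mpr ⟨ind.toList, by rw [hnames]; exact List.mem_map_of_mem hind, j, hp⟩).symm
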